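-- pv_equiv track=rewrite | github.com/adrutkow/casino-game-testing | casino-test.py | howManySameColor
-- ===== SOURCE A (Python) =====
-- def howManySameColor(x):
--     y = []
--     for i in x:
--         if i > 1:
--             y.append(x.count(i))
--     if len(y) == 0:
--         return 0
--     return max(y)
-- ===== SOURCE B (Python) =====
-- def howManySameColor(x):
--     ys = sorted(v for v in x if v > 1)
--     best = 0
--     run = 0
--     prev = None
--     for v in ys:
--         if v == prev:
--             run += 1
--         else:
--             run = 1
--             prev = v
--         if run > best:
--             best = run
--     return best
-- ===== Notes on version B (the rewrite author's own statement) =====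
-- stated objective: faster
-- what changed: A scans the whole list with x.count(i) for every element > 1 (quadratic); B filters the elements > 1, sorts them, and finds the longest run of equal values in one linear pass over the sorted list.
import Mathlib
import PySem

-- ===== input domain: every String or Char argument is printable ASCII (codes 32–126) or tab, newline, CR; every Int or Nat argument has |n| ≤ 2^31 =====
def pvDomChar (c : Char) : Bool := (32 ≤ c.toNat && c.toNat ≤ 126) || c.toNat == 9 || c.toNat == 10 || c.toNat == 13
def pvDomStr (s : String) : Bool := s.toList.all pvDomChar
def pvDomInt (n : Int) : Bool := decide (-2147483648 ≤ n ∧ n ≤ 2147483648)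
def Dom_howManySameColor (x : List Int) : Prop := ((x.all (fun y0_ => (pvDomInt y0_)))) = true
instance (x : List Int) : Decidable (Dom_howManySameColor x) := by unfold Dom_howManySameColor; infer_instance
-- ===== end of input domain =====

-- B filters the elements > 1, sorts them, and takes the longest run of equal values in
-- one pass over the sorted list, instead of A's per-element x.count scan (faster: O(n^2) → O(n log n)).

-- ===== PORT A =====
def howManySameColor (x : List Int) : Int :=
  let y := x.foldl (fun y i => if i > 1 then y ++ [((PySem.List.count x i : Nat) : Int)] else y) []
  if y.length = 0 then 0
  else
    match PySem.List.max? y (fun v => v) with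
    | some m => m
    | none => 0

-- ===== PORT B =====
def howManySameColor_alt (x : List Int) : Int :=
  let ys := PySem.List.sorted (x.filter (fun v => decide (v > 1))) (fun v => v) false
  let st := ys.foldl (fun (s : Int × Int × Option Int) v =>
      let best := s.1
      let run := s.2.1
      let prev := s.2.2
      let (run, prev) := if prev = some v then (run + 1, prev) else ((1 : Int), some v)
      let best := if run > best then run else best
      (best, run, prev)) (0, 0, none)
  st.1

-- ===== PRECONDITION & SPEC =====
def Spec_howManySameColor (x : List Int) (out : Int) : Prop := out = howManySameColor_alt x
instance (x : List Int) (out : Int) : Decidable (Spec_howManySameColor x out) := by unfold Spec_howManySameColor; infer_instance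

-- ===== CLAIM (what is proved, stated in full; the proofs are below) =====
def Claim_equal_howManySameColor : Prop := ∀ (x : List Int), Dom_howManySameColor x → Spec_howManySameColor x (howManySameColor x)

-- ===== LEMMAS AND PROOFS =====

-- B's loop step and the scan over a list (matches the fold in howManySameColor_alt).
def pvStep (s : Int × Int × Option Int) (v : Int) : Int × Int × Option Int :=
  let best := s.1
  let run := s.2.1
  let prev := s.2.2
  let (run, prev) := if prev = some v then (run + 1, prev) else ((1 : Int), some v)
  let best := if run > best then run else best
  (best, run, prev)

def pvScan (l : List Int) (s : Int × Int × Option Int) : Int × Int × Option Int :=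
  l.foldl pvStep s

-- max of the per-distinct-value counts of a list (0 for the empty list).
def pvMaxCount (l : List Int) : Int :=
  ((PySem.List.dedup l).map (fun k => (l.count k : Int))).foldl max 0

lemma pvScan_replicate (k : Nat) : ∀ (b r : Int) (h : Int), r ≤ b →
    pvScan (List.replicate k h) (b, r, some h) = (max b (r + k), r + k, some h) := by
  induction k with
  | zero => intro b r h hrb; simp [pvScan]; omega
  | succ n ih =>
    intro b r h hrb
    have hstep : pvStep (b, r, some h) h = (max b (r + 1), r + 1, some h) := by
      simp [pvStep]; omega
    have : pvScan (List.replicate (n + 1) h) (b, r, some h)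
        = pvScan (List.replicate n h) (max b (r + 1), r + 1, some h) := by
      simp [pvScan, List.replicate_succ, hstep]
    rw [this, ih (max b (r + 1)) (r + 1) h (by omega)]
    simp only [Prod.mk.injEq]
    refine ⟨by push_cast; omega, by push_cast; omega, trivial⟩

lemma pvScan_block (k : Nat) (hk : 1 ≤ k) (b r : Int) (h : Int) (p : Option Int)
    (hp : p ≠ some h) :
    pvScan (List.replicate k h) (b, r, p) = (max b (k : Int), (k : Int), some h) := by
  obtain ⟨n, rfl⟩ : ∃ n, k = n + 1 := ⟨k - 1, by omega⟩
  have hstep : pvStep (b, r, p) h = (max b 1, 1, some h) := by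
    simp [pvStep, hp]; omega
  have : pvScan (List.replicate (n + 1) h) (b, r, p)
      = pvScan (List.replicate n h) (max b 1, 1, some h) := by
    simp [pvScan, List.replicate_succ, hstep]
  rw [this, pvScan_replicate n (max b 1) 1 h (by omega)]
  simp only [Prod.mk.injEq]
  refine ⟨by push_cast; omega, by push_cast; omega, trivial⟩

-- decomposition of a sorted list into its leading block of equal elements
lemma sorted_head_block (h : Int) (t : List Int)
    (hs : (h :: t).Pairwise (fun a b => a ≤ b)) :
    ∃ (k : Nat) (rest : List Int), 1 ≤ k ∧ h :: t = List.replicate k h ++ rest ∧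
      h ∉ rest ∧ rest.Pairwise (fun a b => a ≤ b) ∧ rest.length < (h :: t).length := by
  refine ⟨((h :: t).takeWhile (fun v => v == h)).length, (h :: t).dropWhile (fun v => v == h),
    ?_, ?_, ?_, ?_, ?_⟩
  · have : (h :: t).takeWhile (fun v => v == h) = h :: t.takeWhile (fun v => v == h) := by
      simp
    simp [this]
  · have hrep : (h :: t).takeWhile (fun v => v == h)
        = List.replicate ((h :: t).takeWhile (fun v => v == h)).length h := by
      apply List.eq_replicate_of_mem
      intro v hv
      have := List.mem_takeWhile_imp hv
      simpa using this.symm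
    conv_lhs => rw [← List.takeWhile_append_dropWhile (p := fun v => v == h) (l := h :: t)]
    rw [← hrep]
  · -- h is not in the dropWhile part
    intro hmem
    set rest := (h :: t).dropWhile (fun v => v == h) with hrest
    cases hr : rest with
    | nil => rw [hr] at hmem; simp at hmem
    | cons w ws =>
      have hwh : w ≠ h := by
        have := List.head?_dropWhile_not (p := fun v => v == h) (l := h :: t)
        rw [← hrest, hr] at this
        simp at this
        exact this
      -- rest is a suffix of the sorted list, hence sorted; w is its head, h ∈ rest
      have hsub : rest.Sublist (h :: t) := (List.dropWhile_sublist _)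
      have hps : rest.Pairwise (fun a b => a ≤ b) := hs.sublist hsub
      rw [hr] at hps hmem
      -- w ≤ h since h ∈ ws (h ≠ w) and pairwise
      have hmem' : h ∈ ws := by
        rcases List.mem_cons.1 hmem with h1 | h1
        · exact absurd h1.symm hwh
        · exact h1
      have hwle : w ≤ h := (List.pairwise_cons.1 hps).1 h hmem'
      -- h ≤ w since w ∈ h :: t and h is the head of the sorted list
      have hwin : w ∈ h :: t := hsub.mem (by rw [hr]; exact List.mem_cons_self)
      have hhle : h ≤ w := by
        rcases List.mem_cons.1 hwin with h1 | h1
        · omega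
        · exact (List.pairwise_cons.1 hs).1 w h1
      omega
  · exact hs.sublist (List.dropWhile_sublist _)
  · have hdw : (h :: t).dropWhile (fun v => v == h) = t.dropWhile (fun v => v == h) := by
      simp
    rw [hdw]
    have := List.length_dropWhile_le (p := fun v => v == h) (l := t)
    simpa using Nat.lt_succ_of_le this
  
-- pvMaxCount of a list made of a leading block of k copies of h (absent from the rest)
lemma pvMaxCount_block (k : Nat) (hk : 1 ≤ k) (h : Int) (rest : List Int) (hnm : h ∉ rest) :
    pvMaxCount (List.replicate k h ++ rest) = max (k : Int) (pvMaxCount rest) := by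
  unfold pvMaxCount
  set L := List.replicate k h ++ rest with hL
  have hcntL : L.count h = k := by
    rw [hL, List.count_append, List.count_replicate]
    simp [List.count_eq_zero_of_not_mem hnm]
  have hcntz : ∀ z, z ≠ h → L.count z = rest.count z := by
    intro z hz
    rw [hL, List.count_append, List.count_replicate]
    rw [if_neg (fun e => hz (show (h:Int) = z by simpa using e).symm)]
    omega
  have hmemL : ∀ z, z ∈ L ↔ (z = h ∨ z ∈ rest) := by
    intro z
    rw [hL, List.mem_append, List.mem_replicate]
    constructor
    · rintro (⟨-, rfl⟩ | hz)
      · exact Or.inl rfl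
      · exact Or.inr hz
    · rintro (rfl | hz)
      · exact Or.inl ⟨by omega, rfl⟩
      · exact Or.inr hz
  have hML := PySem.List.le_foldl_max ((PySem.List.dedup L).map (fun k => (L.count k : Int))) (0 : Int)
  have hMr := PySem.List.le_foldl_max ((PySem.List.dedup rest).map (fun k => (rest.count k : Int))) (0 : Int)
  have hmmL := PySem.List.foldl_max_mem ((PySem.List.dedup L).map (fun k => (L.count k : Int))) (0 : Int)
  have hmmr := PySem.List.foldl_max_mem ((PySem.List.dedup rest).map (fun k => (rest.count k : Int))) (0 : Int)
  set ML := ((PySem.List.dedup L).map (fun k => (L.count k : Int))).foldl max 0 with hMLdef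
  set Mr := ((PySem.List.dedup rest).map (fun k => (rest.count k : Int))).foldl max 0 with hMrdef
  -- k ≤ ML
  have h1 : (k : Int) ≤ ML := by
    have hhL : h ∈ L := (hmemL h).2 (Or.inl rfl)
    have : ((L.count h : Nat) : Int) ∈ (PySem.List.dedup L).map (fun k => (L.count k : Int)) :=
      List.mem_map.2 ⟨h, (PySem.List.mem_dedup _ _).2 hhL, rfl⟩
    have := hML.2 _ this
    omega
  -- Mr ≤ ML
  have h2 : Mr ≤ ML := by
    rcases hmmr with hh | hh
    · omega
    · rcases List.mem_map.1 hh with ⟨z, hz, hzv⟩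
      have hzr : z ∈ rest := (PySem.List.mem_dedup _ _).1 hz
      have hzh : z ≠ h := fun e => hnm (e ▸ hzr)
      have hzL : z ∈ L := (hmemL z).2 (Or.inr hzr)
      have hmem : ((L.count z : Nat) : Int) ∈ (PySem.List.dedup L).map (fun k => (L.count k : Int)) :=
        List.mem_map.2 ⟨z, (PySem.List.mem_dedup _ _).2 hzL, rfl⟩
      have := hML.2 _ hmem
      rw [hcntz z hzh] at this
      omega
  -- ML ≤ max k Mr
  have h3 : ML ≤ max (k : Int) Mr := by
    rcases hmmL with hh | hh
    · omega
    · rcases List.mem_map.1 hh with ⟨z, hz, hzv⟩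
      have hzL : z ∈ L := (PySem.List.mem_dedup _ _).1 hz
      rcases (hmemL z).1 hzL with rfl | hzr
      · rw [← hzv, hcntL]; omega
      · have hzh : z ≠ h := fun e => hnm (e ▸ hzr)
        have hmem : ((rest.count z : Nat) : Int) ∈ (PySem.List.dedup rest).map (fun k => (rest.count k : Int)) :=
          List.mem_map.2 ⟨z, (PySem.List.mem_dedup _ _).2 hzr, rfl⟩
        have := hMr.2 _ hmem
        rw [← hzv, hcntz z hzh]
        omega
  omega

-- main loop invariant: scanning a sorted list from a fresh state yields max b (pvMaxCount l)
lemma pvScan_sorted (n : Nat) : ∀ (l : List Int), l.length = n →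
    l.Pairwise (fun a b => a ≤ b) →
    ∀ (b r : Int) (p : Option Int), 0 ≤ b → (∀ v ∈ l, p ≠ some v) →
    (pvScan l (b, r, p)).1 = max b (pvMaxCount l) := by
  induction n using Nat.strong_induction_on with
  | _ n ih =>
    intro l hlen hs b r p hb hp
    cases l with
    | nil => simp [pvScan, pvMaxCount, PySem.List.dedup]; omega
    | cons h t =>
      obtain ⟨k, rest, hk, hdec, hnm, hrs, hlt⟩ := sorted_head_block h t hs
      rw [hdec]
      have hph : p ≠ some h := hp h List.mem_cons_self
      have : pvScan (List.replicate k h ++ rest) (b, r, p)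
          = pvScan rest (pvScan (List.replicate k h) (b, r, p)) := by
        simp [pvScan, List.foldl_append]
      rw [this, pvScan_block k hk b r h p hph]
      have hfresh : ∀ v ∈ rest, (some h : Option Int) ≠ some v := by
        intro v hv hEq
        exact hnm (by injection hEq with hEq; rw [hEq]; exact hv)
      have hln : rest.length < n := by rw [← hlen]; exact hlt
      have := ih rest.length hln rest rfl hrs (max b (k : Int)) (k : Int) (some h)
        (by omega) hfresh
      rw [this, pvMaxCount_block k hk h rest hnm]
      omega

-- foldl max 0 depends only on membership
lemma foldl_max0_eq (L1 L2 : List Int) (hmem : ∀ z, z ∈ L1 ↔ z ∈ L2) :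
    L1.foldl max 0 = L2.foldl max 0 := by
  have h1 := PySem.List.le_foldl_max L1 (0 : Int)
  have h2 := PySem.List.le_foldl_max L2 (0 : Int)
  have hm1 := PySem.List.foldl_max_mem L1 (0 : Int)
  have hm2 := PySem.List.foldl_max_mem L2 (0 : Int)
  have hle1 : L1.foldl max 0 ≤ L2.foldl max 0 := by
    rcases hm1 with hh | hh
    · omega
    · exact h2.2 _ ((hmem _).1 hh)
  have hle2 : L2.foldl max 0 ≤ L1.foldl max 0 := by
    rcases hm2 with hh | hh
    · omega
    · exact h1.2 _ ((hmem _).2 hh)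
  omega

-- A's y list is the filtered list mapped to full-list counts.
lemma a_y_eq (x : List Int) :
    x.foldl (fun y i => if i > 1 then y ++ [((PySem.List.count x i : Nat) : Int)] else y) []
      = (x.filter (fun i => decide (i > 1))).map (fun i => ((PySem.List.count x i : Nat) : Int)) := by
  have := PySem.List.foldl_append_if (fun i => decide (i > 1))
    (fun i => ((PySem.List.count x i : Nat) : Int)) x []
  simpa using this

-- Two running maxima agree when the lists have the same elements, the first seeded with
-- its own head, the second seeded with 0 below every element.
lemma foldl_max_eq_of_same_mem (a : Int) (t L2 : List Int)
    (hmem : ∀ z : Int, z ∈ a :: t ↔ z ∈ L2) (hpos : ∀ z ∈ L2, 1 ≤ z) :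
    t.foldl max a = L2.foldl max 0 := by
  have h1 := PySem.List.le_foldl_max t a
  have h2 := PySem.List.le_foldl_max L2 (0 : Int)
  have hm1 : t.foldl max a ∈ a :: t := by
    rcases PySem.List.foldl_max_mem t a with hh | hh
    · simp [hh]
    · exact List.mem_cons_of_mem _ hh
  have haL2 : a ∈ L2 := (hmem a).1 List.mem_cons_self
  have hM2ge : (1 : Int) ≤ L2.foldl max 0 := le_trans (hpos a haL2) (h2.2 a haL2)
  have hm2 : L2.foldl max 0 ∈ L2 := by
    rcases PySem.List.foldl_max_mem L2 (0 : Int) with hh | hh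
    · omega
    · exact hh
  have hle1 : t.foldl max a ≤ L2.foldl max 0 := h2.2 _ ((hmem _).1 hm1)
  have hle2 : L2.foldl max 0 ≤ t.foldl max a := by
    rcases List.mem_cons.1 ((hmem _).2 hm2) with hh | hh
    · omega
    · exact h1.2 _ hh
  omega

-- A's branch-and-max over f.map (count x ·) equals foldl max 0 over dedup'd f-counts,
-- given that full-list counts agree with f-counts on members of f.
lemma key_eq (x : List Int) : ∀ (f : List Int),
    (∀ i ∈ f, PySem.List.count x i = f.count i) →
    (if (f.map (fun i => ((PySem.List.count x i : Nat) : Int))).length = 0 then (0 : Int)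
     else
       match PySem.List.max? (f.map (fun i => ((PySem.List.count x i : Nat) : Int))) (fun v => v) with
       | some m => m
       | none => 0)
      = pvMaxCount f := by
  intro f hcnt
  cases f with
  | nil => simp [pvMaxCount, PySem.List.dedup]
  | cons h t =>
    have hne : ((h :: t).map (fun i => ((PySem.List.count x i : Nat) : Int))).length ≠ 0 := by simp
    rw [if_neg hne, List.map_cons, PySem.List.max?_id_cons]
    unfold pvMaxCount
    apply foldl_max_eq_of_same_mem
    · intro z
      simp only [List.mem_cons, List.mem_map, PySem.List.mem_dedup]
      constructor
      · rintro (rfl | ⟨i, hi, rfl⟩)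
        · exact ⟨h, Or.inl rfl, by rw [hcnt h List.mem_cons_self]⟩
        · exact ⟨i, Or.inr hi, by rw [hcnt i (List.mem_cons_of_mem _ hi)]⟩
      · rintro ⟨i, hi, rfl⟩
        rcases hi with rfl | hi'
        · exact Or.inl (by rw [hcnt i List.mem_cons_self])
        · exact Or.inr ⟨i, hi', by rw [hcnt i (List.mem_cons_of_mem _ hi')]⟩
    · intro z hz
      simp only [List.mem_map, PySem.List.mem_dedup] at hz
      rcases hz with ⟨i, hi, rfl⟩
      have : 0 < (h :: t).count i := List.count_pos_iff.2 hi
      omega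

-- pvMaxCount is invariant under permutation (sorting the filtered list)
lemma pvMaxCount_perm (l1 l2 : List Int) (hp : l1.Perm l2) :
    pvMaxCount l1 = pvMaxCount l2 := by
  unfold pvMaxCount
  apply foldl_max0_eq
  intro z
  simp only [List.mem_map, PySem.List.mem_dedup]
  constructor
  · rintro ⟨i, hi, rfl⟩
    exact ⟨i, hp.mem_iff.1 hi, by rw [hp.count_eq]⟩
  · rintro ⟨i, hi, rfl⟩
    exact ⟨i, hp.mem_iff.2 hi, by rw [hp.count_eq]⟩

-- ===== VERDICT (by name: the statement is the Claim_ definition above) =====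
theorem howManySameColor_spec : Claim_equal_howManySameColor := by
  intro x _
  show howManySameColor x = howManySameColor_alt x
  unfold howManySameColor howManySameColor_alt
  simp only [a_y_eq]
  set f := x.filter (fun i => decide (i > 1)) with hf
  set ys := PySem.List.sorted f (fun v => v) false with hys
  have hperm : ys.Perm f := PySem.List.sorted_perm f (fun v => v) false
  have hsorted : ys.Pairwise (fun a b => a ≤ b) := PySem.List.sorted_pairwise f (fun v => v)
  have hBscan : ys.foldl (fun (s : Int × Int × Option Int) v =>
      let best := s.1
      let run := s.2.1
      let prev := s.2.2
      let (run, prev) := if prev = some v then (run + 1, prev) else ((1 : Int), some v)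
      let best := if run > best then run else best
      (best, run, prev)) (0, 0, none) = pvScan ys (0, 0, none) := rfl
  rw [hBscan, pvScan_sorted ys.length ys rfl hsorted 0 0 none le_rfl (by intro v _ h; cases h)]
  have hcnt : ∀ i ∈ f, PySem.List.count x i = f.count i := by
    intro i hi
    have hi1 : i > 1 := by simpa using List.of_mem_filter hi
    simp [PySem.List.count_eq, hf, List.count_filter, hi1]
  rw [key_eq x f hcnt, pvMaxCount_perm f ys hperm.symm]
  have hge : 0 ≤ pvMaxCount ys := by
    unfold pvMaxCount
    exact (PySem.List.le_foldl_max _ 0).1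
  omega
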